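-- pv_equiv track=rewrite | github.com/kirk0830/pypwfft | pypwfft/pysrc/fft_handler.py | _search_the_nearest_primitive_number
-- ===== SOURCE A (Python) =====
-- def _search_the_nearest_primitive_number(n, dividee=[2, 3, 5], larger=True):
--     '''
--     search the nearest primitive number of n that can be divided by
--     the numbers in dividee, if larger is True, then search the
--     nearest larger primitive number, otherwise search the nearest
--     smaller primitive number
--     '''
--     if n <= 1:
--         raise ValueError("Input number must be greater than 1.")
--     if larger:
--         while any(n % d != 0 for d in dividee):
--             n += 1
--     else:
--         while any(n % d != 0 for d in dividee) and n > 0: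
--             n -= 1
--     if n <= 0:
--         raise ValueError("No valid primitive number found.")
--     return n
-- ===== SOURCE B (Python) =====
-- def _gcd(a, b):
--     a, b = abs(a), abs(b)
--     while b:
--         a, b = b, a % b
--     return a
--
--
-- def _search_the_nearest_primitive_number(n, dividee=[2, 3, 5], larger=True):
--     '''closed-form variant: round n to the nearest multiple of lcm(dividee)
--     instead of stepping one by one'''
--     if n <= 1:
--         raise ValueError("Input number must be greater than 1.")
--     L = 1
--     for d in dividee:
--         L = L * abs(d) // _gcd(L, d)
--     if larger:
--         candidate = ((n + L - 1) // L) * L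
--     else:
--         candidate = (n // L) * L
--     if candidate <= 0:
--         raise ValueError("No valid primitive number found.")
--     return candidate
-- ===== Notes on version B (the rewrite author's own statement) =====
-- stated objective: faster
-- what changed: Replaces the unit-step increment/decrement search loop with computing L = lcm(dividee) once (Euclid's gcd) and rounding n up/down to the nearest multiple of L in closed form; intended as asymptotically faster (O(L) loop steps vs none) - in a timing run A timed out where B returned, so no clean ratio was measurable.
import Mathlib
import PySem

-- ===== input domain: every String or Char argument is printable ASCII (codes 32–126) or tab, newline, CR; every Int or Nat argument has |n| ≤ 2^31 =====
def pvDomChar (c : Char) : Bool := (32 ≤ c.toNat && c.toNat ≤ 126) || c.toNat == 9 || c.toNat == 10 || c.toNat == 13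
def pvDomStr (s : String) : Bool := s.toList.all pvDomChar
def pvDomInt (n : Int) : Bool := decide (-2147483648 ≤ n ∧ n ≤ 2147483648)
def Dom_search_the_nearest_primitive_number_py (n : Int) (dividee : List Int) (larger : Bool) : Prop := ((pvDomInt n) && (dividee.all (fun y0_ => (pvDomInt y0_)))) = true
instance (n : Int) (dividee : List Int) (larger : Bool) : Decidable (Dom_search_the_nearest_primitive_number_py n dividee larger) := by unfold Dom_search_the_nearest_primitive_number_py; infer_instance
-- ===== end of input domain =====

-- B replaces A's unit-step search loop by computing lcm(dividee) once (Euclid's gcd) and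
-- rounding n to the nearest multiple of it in closed form (a single arithmetic step).

-- ===== PORT A =====
-- lcm of the absolute values of the list (1 for the empty list); used only as a totality
-- fuel bound for A's while-loop and in Pre_ below (A itself never computes it).
def lcmList (l : List Int) : Nat := l.foldl (fun a d => Nat.lcm a d.natAbs) 1

-- 'any(n % d != 0 for d in dividee)' with Python's % (value-wise; the ZeroDivisionError
-- Python raises when 0 ∈ dividee is excluded by Pre_).
def anyNotDvd (dividee : List Int) (n : Int) : Bool :=
  dividee.any (fun d => PySem.Int.mod n d != 0)

-- 'while any(...): n += 1' — fuel only makes it total; inside Pre_ the loop stops within fuel.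
def loopUp (dividee : List Int) : Nat → Int → Int
  | 0, n => n
  | f + 1, n => if anyNotDvd dividee n then loopUp dividee f (n + 1) else n

-- 'while any(...) and n > 0: n -= 1'
def loopDown (dividee : List Int) : Nat → Int → Int
  | 0, n => n
  | f + 1, n => if anyNotDvd dividee n && decide (0 < n) then loopDown dividee f (n - 1) else n

def search_the_nearest_primitive_number_py (n : Int) (dividee : List Int) (larger : Bool) : Int :=
  if n ≤ 1 then 0   -- ValueError, excluded by Pre_
  else
    let m := if larger then loopUp dividee (lcmList dividee + 1) n
             else loopDown dividee (n.toNat + 1) n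
    if m ≤ 0 then 0   -- ValueError, excluded by Pre_
    else m

-- ===== PORT B =====
-- Source B's hand-written Euclid on absolute values: 'a, b = abs(a), abs(b); while b: a, b = b, a % b'
def gcdLoop (a b : Nat) : Nat :=
  if h : b = 0 then a else gcdLoop b (a % b)
termination_by b
decreasing_by exact Nat.mod_lt _ (Nat.pos_of_ne_zero h)

def pyGcd (a b : Int) : Int := (gcdLoop a.natAbs b.natAbs : Nat)

def search_the_nearest_primitive_number_py_alt (n : Int) (dividee : List Int) (larger : Bool) : Int :=
  if n ≤ 1 then 0   -- ValueError, excluded by Pre_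
  else
    let L := dividee.foldl (fun L d => PySem.Int.floordiv (L * (d.natAbs : Int)) (pyGcd L d)) 1
    let candidate := if larger then PySem.Int.floordiv (n + L - 1) L * L
                     else PySem.Int.floordiv n L * L
    if candidate ≤ 0 then 0   -- ValueError, excluded by Pre_
    else candidate

-- ===== PRECONDITION & SPEC =====
-- Pre_ excludes exactly the inputs on which Python A raises (and B raises the same way):
-- n ≤ 1 (ValueError), 0 ∈ dividee (ZeroDivisionError), and, when larger is false, n below
-- lcm(dividee) (the downward search hits 0 and raises ValueError).
def Pre_search_the_nearest_primitive_number_py (n : Int) (dividee : List Int) (larger : Bool) : Prop :=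
  1 < n ∧ (∀ d ∈ dividee, d ≠ 0) ∧ (larger = false → (lcmList dividee : Int) ≤ n)
instance (n : Int) (dividee : List Int) (larger : Bool) : Decidable (Pre_search_the_nearest_primitive_number_py n dividee larger) := by unfold Pre_search_the_nearest_primitive_number_py; infer_instance

def pvWitness_search_the_nearest_primitive_number_py : Int × List Int × Bool := (7, [2, 3], true)

def Spec_search_the_nearest_primitive_number_py (n : Int) (dividee : List Int) (larger : Bool) (out : Int) : Prop := out = search_the_nearest_primitive_number_py_alt n dividee larger
instance (n : Int) (dividee : List Int) (larger : Bool) (out : Int) : Decidable (Spec_search_the_nearest_primitive_number_py n dividee larger out) := by unfold Spec_search_the_nearest_primitive_number_py; infer_instance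

-- ===== CLAIM (what is proved, stated in full; the proofs are below) =====
def Claim_equal_search_the_nearest_primitive_number_py : Prop := ∀ (n : Int) (dividee : List Int) (larger : Bool), Dom_search_the_nearest_primitive_number_py n dividee larger → Pre_search_the_nearest_primitive_number_py n dividee larger → Spec_search_the_nearest_primitive_number_py n dividee larger (search_the_nearest_primitive_number_py n dividee larger)

-- ===== LEMMAS AND PROOFS =====

-- Source B's Euclid loop computes Nat.gcd.
theorem gcdLoop_eq (a b : Nat) : gcdLoop a b = Nat.gcd a b := by
  fun_induction gcdLoop a b with
  | case1 a => simp
  | case2 a b h ih => rw [ih, Nat.gcd_comm a b, Nat.gcd_rec b a, Nat.gcd_comm]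

-- one lcm step of Source B's fold, on positive inputs
theorem lcm_step (a : Nat) (d : Int) (hd : d ≠ 0) :
    PySem.Int.floordiv ((a : Int) * (d.natAbs : Int)) (pyGcd (a : Int) d)
      = (Nat.lcm a d.natAbs : Int) := by
  have h0 : pyGcd (a : Int) d = (Nat.gcd a d.natAbs : Int) := by
    simp [pyGcd, gcdLoop_eq]
  rw [h0]
  have h1 : (a : Int) * (d.natAbs : Int) = ((a * d.natAbs : Nat) : Int) := by push_cast; ring
  rw [h1, PySem.Int.floordiv_natCast]
  norm_cast

-- Source B's fold equals the Nat lcm fold, provided no divisor is zero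
theorem foldB_eq (l : List Int) (hd : ∀ d ∈ l, d ≠ 0) (a : Nat) :
    l.foldl (fun L d => PySem.Int.floordiv (L * (d.natAbs : Int)) (pyGcd L d)) (a : Int)
      = (l.foldl (fun x d => Nat.lcm x d.natAbs) a : Nat) := by
  induction l generalizing a with
  | nil => simp
  | cons d t ih =>
      have hd0 : d ≠ 0 := hd d (List.mem_cons_self ..)
      simp only [List.foldl_cons]
      rw [lcm_step a d hd0, ih (fun x hx => hd x (List.mem_cons_of_mem _ hx))]

-- lcmList is positive when no divisor is zero
theorem lcmFold_pos (l : List Int) (hd : ∀ d ∈ l, d ≠ 0) (a : Nat) (ha : 0 < a) :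
    0 < l.foldl (fun x d => Nat.lcm x d.natAbs) a := by
  induction l generalizing a with
  | nil => simpa
  | cons d t ih =>
      exact ih (fun x hx => hd x (List.mem_cons_of_mem _ hx)) _
        (Nat.pos_of_ne_zero (Nat.lcm_ne_zero (by omega)
          (Int.natAbs_ne_zero.mpr (hd d (List.mem_cons_self ..)))))

theorem lcmList_pos (l : List Int) (hd : ∀ d ∈ l, d ≠ 0) : 0 < lcmList l :=
  lcmFold_pos l hd 1 Nat.one_pos

-- the fold's lcm divides m iff every list element does (and the seed does)
theorem lcmFold_dvd_iff (l : List Int) (m : Int) (a : Nat) :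
    ((l.foldl (fun x d => Nat.lcm x d.natAbs) a : Nat) : Int) ∣ m
      ↔ ((a : Int) ∣ m ∧ ∀ d ∈ l, d ∣ m) := by
  induction l generalizing a with
  | nil => simp
  | cons d t ih =>
      simp only [List.foldl_cons, ih, List.mem_cons]
      rw [Int.natCast_dvd, Int.natCast_dvd, Nat.lcm_dvd_iff, ← Int.natCast_dvd,
        ← Int.natCast_dvd, Int.natAbs_dvd]
      constructor
      · rintro ⟨⟨h1, h2⟩, h3⟩
        exact ⟨h1, fun x hx => hx.elim (fun he => he ▸ h2) (h3 x)⟩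
      · rintro ⟨h1, h2⟩
        exact ⟨⟨h1, h2 d (Or.inl rfl)⟩, fun x hx => h2 x (Or.inr hx)⟩

theorem lcmList_dvd_iff (l : List Int) (m : Int) :
    ((lcmList l : Nat) : Int) ∣ m ↔ ∀ d ∈ l, d ∣ m := by
  rw [lcmList, lcmFold_dvd_iff]
  simp

-- the loop condition is false exactly when every divisor divides n
theorem anyNotDvd_eq_false_iff (l : List Int) (n : Int) :
    anyNotDvd l n = false ↔ ((lcmList l : Nat) : Int) ∣ n := by
  rw [lcmList_dvd_iff]
  simp [anyNotDvd, PySem.Int.mod_eq_zero_iff_dvd]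

-- A's upward loop reaches the least multiple of lcmList ≥ n (given enough fuel)
theorem loopUp_spec (l : List Int) (f : Nat) : ∀ (n c : Int),
    n ≤ c → c - n < (f : Int) → ((lcmList l : Nat) : Int) ∣ c →
    (∀ m : Int, n ≤ m → ((lcmList l : Nat) : Int) ∣ m → c ≤ m) →
    loopUp l f n = c := by
  induction f with
  | zero => intro n c h1 h2 _ _; omega
  | succ f ih =>
      intro n c h1 h2 hc hmin
      rw [loopUp]
      by_cases h : anyNotDvd l n = true
      · have hne : ¬ ((lcmList l : Nat) : Int) ∣ n := by
          intro hdvd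
          rw [← anyNotDvd_eq_false_iff] at hdvd
          simp [hdvd] at h
        have hlt : n < c := by
          rcases lt_or_eq_of_le h1 with h' | h'
          · exact h'
          · exact absurd (h' ▸ hc) hne
        rw [if_pos h]
        exact ih (n + 1) c (by omega) (by push_cast at h2 ⊢; omega) hc
          (fun m hm => hmin m (by omega))
      · rw [if_neg h]
        have h' : anyNotDvd l n = false := by simpa using h
        have := hmin n le_rfl ((anyNotDvd_eq_false_iff l n).mp h')
        omega

-- A's downward loop reaches the greatest multiple of lcmList ≤ n, when it is positive
theorem loopDown_spec (l : List Int) (f : Nat) : ∀ (n c : Int),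
    c ≤ n → n - c < (f : Int) → 0 < c → ((lcmList l : Nat) : Int) ∣ c →
    (∀ m : Int, c < m → m ≤ n → ¬ ((lcmList l : Nat) : Int) ∣ m) →
    loopDown l f n = c := by
  induction f with
  | zero => intro n c h1 h2 _ _ _; omega
  | succ f ih =>
      intro n c h1 h2 h3 hc hmax
      rw [loopDown]
      by_cases h : anyNotDvd l n = true
      · have hne : ¬ ((lcmList l : Nat) : Int) ∣ n := by
          intro hdvd
          rw [← anyNotDvd_eq_false_iff] at hdvd
          simp [hdvd] at h
        have hlt : c < n := by
          rcases lt_or_eq_of_le h1 with h' | h'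
          · exact h'
          · exact absurd (h' ▸ hc) hne
        rw [if_pos (by simp [h]; omega)]
        exact ih (n - 1) c (by omega) (by push_cast at h2 ⊢; omega) h3 hc
          (fun m hm hm' => hmax m hm (by omega))
      · rw [if_neg (by simp [h])]
        have h' : anyNotDvd l n = false := by simpa using h
        have hdvd := (anyNotDvd_eq_false_iff l n).mp h'
        by_contra hne
        exact hmax n (by omega) le_rfl hdvd

-- ===== VERDICT (by name: the statement is the Claim_ definition above) =====
theorem search_the_nearest_primitive_number_py_spec : Claim_equal_search_the_nearest_primitive_number_py := by
  intro n dividee larger _hdom hpre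
  obtain ⟨hn, hd, hsm⟩ := hpre
  unfold Spec_search_the_nearest_primitive_number_py
  unfold search_the_nearest_primitive_number_py search_the_nearest_primitive_number_py_alt
  have hn1 : ¬ n ≤ 1 := by omega
  have hLpos : (0 : Int) < ((lcmList dividee : Nat) : Int) := by
    exact_mod_cast lcmList_pos dividee hd
  have hfold : dividee.foldl (fun L d => PySem.Int.floordiv (L * (d.natAbs : Int)) (pyGcd L d)) 1
      = ((lcmList dividee : Nat) : Int) := by
    simpa [lcmList] using foldB_eq dividee hd 1
  cases larger with
  | true =>
      set L : Int := ((lcmList dividee : Nat) : Int) with hLdef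
      have hmod := PySem.Int.floordiv_mul_add_mod (n + L - 1) L
      have hmn := PySem.Int.mod_nonneg (n + L - 1) hLpos
      have hml := PySem.Int.mod_lt (n + L - 1) hLpos
      have hcge : n ≤ PySem.Int.floordiv (n + L - 1) L * L := by linarith
      have hcle : PySem.Int.floordiv (n + L - 1) L * L ≤ n + L - 1 := by linarith
      have hcd : L ∣ PySem.Int.floordiv (n + L - 1) L * L :=
        Dvd.intro_left _ rfl
      have hmin : ∀ m : Int, n ≤ m → L ∣ m → PySem.Int.floordiv (n + L - 1) L * L ≤ m := by
        intro m hm hdvd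
        by_contra hlt
        have hdm : L ∣ (PySem.Int.floordiv (n + L - 1) L * L - m) := dvd_sub hcd hdvd
        have hle := Int.le_of_dvd (by omega) hdm
        omega
      have hloop : loopUp dividee (lcmList dividee + 1) n
          = PySem.Int.floordiv (n + L - 1) L * L := by
        apply loopUp_spec dividee _ n _ hcge _ hcd hmin
        push_cast
        omega
      simp only [if_neg hn1, hfold, eq_self_iff_true, if_true, hloop]
  | false =>
      set L : Int := ((lcmList dividee : Nat) : Int) with hLdef
      have hLn : L ≤ n := hsm rfl
      have hmod := PySem.Int.floordiv_mul_add_mod n L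
      have hmn := PySem.Int.mod_nonneg n hLpos
      have hml := PySem.Int.mod_lt n hLpos
      have hcle : PySem.Int.floordiv n L * L ≤ n := by linarith
      have hcgt : n - L < PySem.Int.floordiv n L * L := by linarith
      have hcd : L ∣ PySem.Int.floordiv n L * L := Dvd.intro_left _ rfl
      have hcpos : (0 : Int) < PySem.Int.floordiv n L * L := by omega
      have hmax : ∀ m : Int, PySem.Int.floordiv n L * L < m → m ≤ n → ¬ L ∣ m := by
        intro m hm hm' hdvd
        have hdm : L ∣ (m - PySem.Int.floordiv n L * L) := dvd_sub hdvd hcd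
        have hle := Int.le_of_dvd (by omega) hdm
        omega
      have hloop : loopDown dividee (n.toNat + 1) n = PySem.Int.floordiv n L * L := by
        apply loopDown_spec dividee _ n _ hcle _ hcpos hcd hmax
        push_cast
        omega
      simp only [if_neg hn1, hfold, Bool.false_eq_true, if_false, hloop]
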